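-- pv_equiv track=rewrite | github.com/paiml/depyler | examples/hard_sequence_diff.py | restore_from_diff
-- ===== SOURCE A (Python) =====
-- def restore_from_diff(first_val: int, diffs: list[int]) -> list[int]:
--     """Restore original sequence from first value and first differences."""
--     result: list[int] = [first_val]
--     idx: int = 0
--     length: int = len(diffs)
--     while idx < length:
--         prev_val: int = result[idx]
--         result.append(prev_val + diffs[idx])
--         idx = idx + 1
--     return result
-- ===== SOURCE B (Python) =====
-- def restore_from_diff(first_val: int, diffs: list[int]) -> list[int]:
--     """Restore original sequence from first value and first differences.
--
--     Builds the sequence back-to-front: the last element is first_val plus the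
--     sum of all diffs; walking the diffs in reverse and subtracting recovers
--     each earlier element, and a final reverse restores the order.
--     """
--     total = first_val + sum(diffs)
--     out = [total]
--     for d in reversed(diffs):
--         total -= d
--         out.append(total)
--     out.reverse()
--     return out
-- ===== Notes on version B (the rewrite author's own statement) =====
-- stated objective: alternative
-- what changed: Instead of running the recurrence forward by indexing into the growing result list, B first computes the final element as first_val plus the total of diffs, then rebuilds the sequence back-to-front by walking the diffs in reverse and subtracting, and reverses the buffer at the end.
import Mathlib
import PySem

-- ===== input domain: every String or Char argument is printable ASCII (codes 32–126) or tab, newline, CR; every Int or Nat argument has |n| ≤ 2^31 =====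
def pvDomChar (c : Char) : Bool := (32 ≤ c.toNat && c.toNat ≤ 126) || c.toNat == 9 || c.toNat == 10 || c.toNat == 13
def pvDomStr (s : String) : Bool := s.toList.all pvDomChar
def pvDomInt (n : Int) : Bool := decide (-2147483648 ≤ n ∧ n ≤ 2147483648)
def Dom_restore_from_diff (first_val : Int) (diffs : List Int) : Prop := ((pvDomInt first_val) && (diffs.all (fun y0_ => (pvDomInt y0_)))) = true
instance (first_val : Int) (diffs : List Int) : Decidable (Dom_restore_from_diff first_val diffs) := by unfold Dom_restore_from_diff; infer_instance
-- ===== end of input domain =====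

-- B replaces A's forward loop indexing into the growing result with a back-to-front
-- build: last element = first_val + sum(diffs), then walk diffs in reverse subtracting,
-- and reverse the buffer (alternative decomposition; same O(n) cost).

-- ===== PORT A =====
-- while idx < length: prev = result[idx]; result.append(prev + diffs[idx]); idx += 1
-- (result[idx] and diffs[idx] via pyGet?; the .getD 0 default is never reached since
--  0 ≤ idx < length ≤ result length at every iteration, so the port is exact)
def restoreLoopA (diffs : List Int) (result : List Int) (idx : Nat) : List Int :=
  if _h : idx < diffs.length then
    let prev_val : Int := (PySem.List.pyGet? result (idx : Int)).getD 0
    restoreLoopA diffs (result ++ [prev_val + (PySem.List.pyGet? diffs (idx : Int)).getD 0]) (idx + 1)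
  else result
termination_by diffs.length - idx

def restore_from_diff (first_val : Int) (diffs : List Int) : List Int :=
  restoreLoopA diffs [first_val] 0

-- ===== PORT B =====
-- total = first_val + sum(diffs); out = [total];
-- for d in reversed(diffs): total -= d; out.append(total);  out.reverse()
def restore_from_diff_alt (first_val : Int) (diffs : List Int) : List Int :=
  let total : Int := first_val + diffs.foldl (· + ·) 0
  let st := diffs.reverse.foldl
    (fun (st : Int × List Int) d => (st.1 - d, st.2 ++ [st.1 - d])) (total, [total])
  st.2.reverse

-- ===== PRECONDITION & SPEC =====
def Spec_restore_from_diff (first_val : Int) (diffs : List Int) (out : List Int) : Prop := out = restore_from_diff_alt first_val diffs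
instance (first_val : Int) (diffs : List Int) (out : List Int) : Decidable (Spec_restore_from_diff first_val diffs out) := by unfold Spec_restore_from_diff; infer_instance

-- ===== CLAIM (what is proved, stated in full; the proofs are below) =====
def Claim_equal_restore_from_diff : Prop := ∀ (first_val : Int) (diffs : List Int), Dom_restore_from_diff first_val diffs → Spec_restore_from_diff first_val diffs (restore_from_diff first_val diffs)

-- ===== LEMMAS AND PROOFS =====

-- reference shape: forward running sums (proof-only; neither port computes with it)
def accRef (cur : Int) : List Int → List Int
  | [] => []
  | d :: ds => (cur + d) :: accRef (cur + d) ds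

-- descending running values produced by B's backward loop
def descRef (cur : Int) : List Int → List Int
  | [] => []
  | d :: ds => (cur - d) :: descRef (cur - d) ds

-- A's loop invariant: from position idx with last element cur, it appends accRef.
theorem restoreLoopA_eq (diffs : List Int) : ∀ (n idx : Nat) (res : List Int) (cur : Int),
    n = diffs.length - idx → res.length = idx + 1 →
    PySem.List.pyGet? res (idx : Int) = some cur →
    restoreLoopA diffs res idx = res ++ accRef cur (diffs.drop idx) := by
  intro n
  induction n with
  | zero =>
    intro idx res cur hn _ _
    have h : ¬ idx < diffs.length := by omega
    rw [restoreLoopA]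
    simp [h, List.drop_eq_nil_of_le (Nat.le_of_not_lt h), accRef]
  | succ n ih =>
    intro idx res cur hn hlen hget
    rw [restoreLoopA]
    by_cases h : idx < diffs.length
    · simp only [h, dif_pos]
      have hd : diffs.drop idx = diffs[idx] :: diffs.drop (idx + 1) :=
        List.drop_eq_getElem_cons h
      have hdg : PySem.List.pyGet? diffs (idx : Int) = some diffs[idx] := by
        rw [PySem.List.pyGet?_natCast]; simp [h]
      rw [hget, hdg]
      simp only [Option.getD_some]
      rw [ih (idx + 1) (res ++ [cur + diffs[idx]]) (cur + diffs[idx]) (by omega)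
            (by simp [hlen]) ?_]
      · rw [hd]
        simp [accRef]
      · have hc : ((idx + 1 : Nat) : Int) = ((res.length : Nat) : Int) := by
          simp [hlen]
        rw [hc, PySem.List.pyGet?_append_length]
    · simp [h, List.drop_eq_nil_of_le (Nat.le_of_not_lt h), accRef]

theorem restore_from_diff_acc (first_val : Int) (diffs : List Int) :
    restore_from_diff first_val diffs = first_val :: accRef first_val diffs := by
  unfold restore_from_diff
  rw [restoreLoopA_eq diffs (diffs.length - 0) 0 [first_val] first_val rfl (by simp)
      (by simp)]
  simp

-- B's fold over ds with state (c, acc) appends descRef and ends at c - sum ds.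
theorem foldl_step_eq (ds : List Int) : ∀ (c : Int) (acc : List Int),
    ds.foldl (fun (st : Int × List Int) d => (st.1 - d, st.2 ++ [st.1 - d])) (c, acc)
      = (c - ds.sum, acc ++ descRef c ds) := by
  induction ds with
  | nil => intro c acc; simp [descRef]
  | cons d ds ih =>
    intro c acc
    simp only [List.foldl_cons, ih, descRef, List.sum_cons]
    refine Prod.ext ?_ ?_
    · simp; ring
    · simp

theorem descRef_append (xs ys : List Int) : ∀ c : Int,
    descRef c (xs ++ ys) = descRef c xs ++ descRef (c - xs.sum) ys := by
  induction xs with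
  | nil => intro c; simp [descRef]
  | cons x xs ih => intro c; simp [descRef, ih, sub_sub]

-- the backward pass from a + sum ds over ds.reverse is the reverse of the forward pass
theorem desc_rev_eq_acc (ds : List Int) : ∀ a : Int,
    (a + ds.sum) :: descRef (a + ds.sum) ds.reverse = (a :: accRef a ds).reverse := by
  induction ds with
  | nil => intro a; simp [descRef, accRef]
  | cons d ds ih =>
    intro a
    have hsum : ds.reverse.sum = ds.sum := List.sum_reverse ds
    simp only [List.reverse_cons, descRef_append, accRef, List.sum_cons]
    have h1 : a + (d + ds.sum) = (a + d) + ds.sum := by ring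
    have h2 : (a + d) + ds.sum - ds.reverse.sum = a + d := by rw [hsum]; ring
    rw [h1, h2]
    have := ih (a + d)
    simp only [descRef]
    rw [show ((a + d + ds.sum) :: (descRef (a + d + ds.sum) ds.reverse ++ [a + d - d]))
          = (((a + d + ds.sum) :: descRef (a + d + ds.sum) ds.reverse) ++ [a + d - d]) from rfl]
    rw [this]
    simp

theorem foldl_add_gen (ds : List Int) : ∀ c : Int, ds.foldl (· + ·) c = c + ds.sum := by
  induction ds with
  | nil => intro c; simp
  | cons d ds ih => intro c; simp [List.foldl_cons, ih]; ring

theorem foldl_add_eq_sum (ds : List Int) : ds.foldl (· + ·) 0 = ds.sum := by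
  rw [foldl_add_gen]; ring

theorem restore_from_diff_spec : Claim_equal_restore_from_diff := by
  intro first_val diffs _
  unfold Spec_restore_from_diff restore_from_diff_alt
  rw [restore_from_diff_acc]
  simp only [foldl_add_eq_sum, foldl_step_eq]
  rw [show ([first_val + diffs.sum] ++ descRef (first_val + diffs.sum) diffs.reverse)
        = (first_val :: accRef first_val diffs).reverse from desc_rev_eq_acc diffs first_val]
  simp
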